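-- pv_equiv track=rewrite | github.com/jazzm0/hackerrank | lucky_triplets.py | solution
-- ===== SOURCE A (Python) =====
-- def solution(l):
--     n = len(l)
--     c = [0] * n
--     count = 0
--     for i in range(n):
--         for j in range(i + 1, n):
--             if l[j] % l[i] == 0:
--                 c[j] += 1
--                 count += c[i]
--
--     return count
-- ===== SOURCE B (Python) =====
-- def solution(l):
--     n = len(l)
--     total = 0
--     for j in range(n):
--         left = 0
--         for i in range(j):
--             if l[j] % l[i] == 0:
--                 left += 1
--         right = 0
--         for k in range(j + 1, n):
--             if l[k] % l[j] == 0: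
--                 right += 1
--         total += left * right
--     return total
-- ===== Notes on version B (the rewrite author's own statement) =====
-- stated objective: alternative
-- what changed: B counts triplets by their middle element (left divisor-predecessors times right multiple-successors, summed), eliminating A's mutable per-index counter array and interleaved accumulation.
import Mathlib
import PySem

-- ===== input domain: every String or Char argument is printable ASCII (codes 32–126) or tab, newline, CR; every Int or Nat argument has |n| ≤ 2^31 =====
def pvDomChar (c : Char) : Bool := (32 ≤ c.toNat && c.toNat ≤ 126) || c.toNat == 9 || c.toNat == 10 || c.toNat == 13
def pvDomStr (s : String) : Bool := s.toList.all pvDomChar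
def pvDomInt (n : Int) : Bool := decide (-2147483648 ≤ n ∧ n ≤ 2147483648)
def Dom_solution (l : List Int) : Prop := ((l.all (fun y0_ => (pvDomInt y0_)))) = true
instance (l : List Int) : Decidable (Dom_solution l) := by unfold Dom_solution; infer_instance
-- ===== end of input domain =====

-- B replaces A's mutable counter array and interleaved accumulation by counting, for each
-- middle element, its left divisor-predecessors and right multiple-successors and summing the
-- products (same O(n^2) cost, different decomposition). Return-value equivalence only.

-- ===== PORT A =====
def solution (l : List Int) : Int :=
  let n := l.length
  ((List.range n).foldl (fun (s : List Int × Int) (i : Nat) =>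
      (List.range' (i+1) (n - (i+1))).foldl (fun (s : List Int × Int) (j : Nat) =>
        if PySem.Int.mod (l.getD j 0) (l.getD i 0) == 0 then
          (s.1.set j (s.1.getD j 0 + 1), s.2 + (s.1.set j (s.1.getD j 0 + 1)).getD i 0)
        else s) s)
    (List.replicate n 0, 0)).2

-- ===== PORT B =====
def solution_alt (l : List Int) : Int :=
  let n := l.length
  (List.range n).foldl (fun (total : Int) (j : Nat) =>
    let left : Int := (List.range j).foldl (fun (a : Int) (i : Nat) =>
      if PySem.Int.mod (l.getD j 0) (l.getD i 0) == 0 then a + 1 else a) 0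
    let right : Int := (List.range' (j+1) (n - (j+1))).foldl (fun (a : Int) (k : Nat) =>
      if PySem.Int.mod (l.getD k 0) (l.getD j 0) == 0 then a + 1 else a) 0
    total + left * right) 0

-- ===== PRECONDITION & SPEC =====
-- Pre_ excludes exactly the inputs where the Python A raises ZeroDivisionError:
-- a 0 anywhere before the last element is used as a '%' divisor (B raises there too).
def Pre_solution (l : List Int) : Prop := (0 : Int) ∉ l.dropLast
instance (l : List Int) : Decidable (Pre_solution l) := by unfold Pre_solution; infer_instance
def pvWitness_solution : List Int := [1, 2, 4, 3]

def Spec_solution (l : List Int) (out : Int) : Prop := out = solution_alt l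
instance (l : List Int) (out : Int) : Decidable (Spec_solution l out) := by unfold Spec_solution; infer_instance

-- ===== CLAIM (what is proved, stated in full; the proofs are below) =====
def Claim_equal_solution : Prop := ∀ (l : List Int), Dom_solution l → Pre_solution l → Spec_solution l (solution l)

-- ===== LEMMAS AND PROOFS =====

-- the divisibility test both ports run on an index pair
def pvP (l : List Int) (j i : Nat) : Bool := PySem.Int.mod (l.getD j 0) (l.getD i 0) == 0
-- number of divisor-predecessors of position j
def pvCnt (l : List Int) (j : Nat) : Int := (((List.range j).filter (fun i => pvP l j i)).length : Int)
-- number of multiple-successors of position j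
def pvRgt (l : List Int) (j : Nat) : Int := (((List.range' (j+1) (l.length - (j+1))).filter (fun k => pvP l k j)).length : Int)

lemma pvP_def (l : List Int) (j i : Nat) :
    (PySem.Int.mod (l.getD j 0) (l.getD i 0) == 0) = pvP l j i := rfl

lemma count_foldl (p : Nat → Bool) : ∀ (L : List Nat) (a : Int),
    L.foldl (fun a x => if p x then a + 1 else a) a = a + ((L.filter p).length : Int) := by
  intro L
  induction L with
  | nil => intro a; simp
  | cons x L ih =>
    intro a
    by_cases h : p x <;> simp [h, ih] <;> push_cast <;> ring

lemma alt_eq_sum (l : List Int) :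
    solution_alt l = (((List.range l.length).map (fun j => pvCnt l j * pvRgt l j)).sum) := by
  unfold solution_alt
  have h : (fun (total : Int) (j : Nat) =>
      total + ((List.range j).foldl (fun (a : Int) (i : Nat) =>
        if PySem.Int.mod (l.getD j 0) (l.getD i 0) == 0 then a + 1 else a) 0) *
        ((List.range' (j+1) (l.length - (j+1))).foldl (fun (a : Int) (k : Nat) =>
        if PySem.Int.mod (l.getD k 0) (l.getD j 0) == 0 then a + 1 else a) 0)) =
      (fun (total : Int) (j : Nat) => total + pvCnt l j * pvRgt l j) := by
    funext t j
    rw [count_foldl (fun i => (PySem.Int.mod (l.getD j 0) (l.getD i 0) == 0)) (List.range j) 0,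
        count_foldl (fun k => (PySem.Int.mod (l.getD k 0) (l.getD j 0) == 0))
          (List.range' (j+1) (l.length - (j+1))) 0]
    simp [pvCnt, pvRgt, pvP]
  simp only []
  rw [h, PySem.List.foldl_add]
  simp

-- the inner loop of A, characterised
lemma innerA (l : List Int) (i : Nat) : ∀ (len a : Nat) (c : List Int) (t : Int),
    i < a → a + len ≤ l.length → c.length = l.length →
    ((List.range' a len).foldl (fun (s : List Int × Int) (j : Nat) =>
        if PySem.Int.mod (l.getD j 0) (l.getD i 0) == 0 then
          (s.1.set j (s.1.getD j 0 + 1), s.2 + (s.1.set j (s.1.getD j 0 + 1)).getD i 0)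
        else s) (c, t)) =
      ((List.range' a len).foldl (fun (c : List Int) (j : Nat) =>
          if pvP l j i then c.set j (c.getD j 0 + 1) else c) c,
       t + c.getD i 0 * (((List.range' a len).filter (fun j => pvP l j i)).length : Int)) := by
  intro len
  induction len with
  | zero => intro a c t _ _ _; simp
  | succ m ih =>
    intro a c t hia hlen hc
    simp only [pvP_def] at ih ⊢
    rw [List.range'_succ]
    simp only [List.foldl_cons, List.filter_cons]
    have hne : i ≠ a := Nat.ne_of_lt hia
    have hgi : (c.set a (c.getD a 0 + 1)).getD i 0 = c.getD i 0 := by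
      simp [List.getD_eq_getElem?_getD, List.getElem?_set_ne (Ne.symm hne)]
    by_cases h : pvP l a i = true
    · rw [if_pos h, if_pos h, if_pos h]
      rw [ih (a+1) (c.set a (c.getD a 0 + 1)) (t + (c.set a (c.getD a 0 + 1)).getD i 0)
            (by omega) (by omega) (by simp [hc])]
      simp only [Prod.mk.injEq, List.length_cons, hgi]
      exact ⟨trivial, by push_cast; ring⟩
    · rw [if_neg h, if_neg h, if_neg h]
      exact ih (a+1) c t (by omega) (by omega) hc

-- pointwise description of the array the inner loop produces
lemma innerA_arr (l : List Int) (i : Nat) : ∀ (len a : Nat) (c : List Int),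
    a + len ≤ l.length → c.length = l.length →
    (∀ j : Nat,
      ((List.range' a len).foldl (fun (c : List Int) (j : Nat) =>
          if pvP l j i then c.set j (c.getD j 0 + 1) else c) c).getD j 0 =
        c.getD j 0 + (if j ∈ List.range' a len ∧ pvP l j i then 1 else 0)) ∧
    ((List.range' a len).foldl (fun (c : List Int) (j : Nat) =>
        if pvP l j i then c.set j (c.getD j 0 + 1) else c) c).length = c.length := by
  intro len
  induction len with
  | zero => intro a c _ _; simp
  | succ m ih =>
    intro a c hlen hc
    rw [List.range'_succ]
    simp only [List.foldl_cons]
    set c₁ := if pvP l a i then c.set a (c.getD a 0 + 1) else c with hc₁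
    have hc₁len : c₁.length = l.length := by
      rw [hc₁]; split <;> simp [hc]
    obtain ⟨hpt, hln⟩ := ih (a+1) c₁ (by omega) hc₁len
    refine ⟨?_, by rw [hln, hc₁]; split <;> simp [hc]⟩
    intro j
    rw [hpt j]
    have hja : a < c.length := by omega
    have hc₁j : c₁.getD j 0 = c.getD j 0 + (if j = a ∧ pvP l a i then 1 else 0) := by
      rw [hc₁]
      by_cases hp : pvP l a i
      · by_cases hje : j = a
        · subst hje
          simp [hp, List.getD_eq_getElem?_getD, List.getElem?_set_self hja]
        · simp [hp, hje, List.getD_eq_getElem?_getD, List.getElem?_set_ne (Ne.symm hje)]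
      · simp [hp]
    rw [hc₁j]
    by_cases hje : j = a
    · rw [hje]
      rw [if_neg (fun hh : a ∈ List.range' (a+1) m ∧ pvP l a i = true => by
            have := List.mem_range'_1.mp hh.1; omega)]
      by_cases hp : pvP l a i = true
      · rw [if_pos (⟨rfl, hp⟩ : a = a ∧ pvP l a i = true),
            if_pos (⟨List.mem_cons_self, hp⟩ : a ∈ a :: List.range' (a+1) m ∧ pvP l a i = true)]
        ring
      · rw [if_neg (fun hh : a = a ∧ pvP l a i = true => hp hh.2),
            if_neg (fun hh : a ∈ a :: List.range' (a+1) m ∧ pvP l a i = true => hp hh.2)]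
        ring
    · rw [if_neg (fun hh : j = a ∧ pvP l a i = true => hje hh.1)]
      by_cases hin : j ∈ List.range' (a+1) m
      · by_cases hp : pvP l j i = true
        · rw [if_pos (⟨hin, hp⟩ : j ∈ List.range' (a+1) m ∧ pvP l j i = true),
              if_pos (⟨List.mem_cons_of_mem a hin, hp⟩ :
                j ∈ a :: List.range' (a+1) m ∧ pvP l j i = true)]
          ring
        · rw [if_neg (fun hh : j ∈ List.range' (a+1) m ∧ pvP l j i = true => hp hh.2),
              if_neg (fun hh : j ∈ a :: List.range' (a+1) m ∧ pvP l j i = true => hp hh.2)]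
          ring
      · rw [if_neg (fun hh : j ∈ List.range' (a+1) m ∧ pvP l j i = true => hin hh.1),
            if_neg (fun hh : j ∈ a :: List.range' (a+1) m ∧ pvP l j i = true =>
              (List.mem_cons.mp hh.1).elim (fun h => hje h) (fun h => hin h))]
        ring

-- the outer loop of A, characterised
lemma outerA (l : List Int) : ∀ (m : Nat), m ≤ l.length →
    ∃ C : List Int,
      ((List.range m).foldl (fun (s : List Int × Int) (i : Nat) =>
          (List.range' (i+1) (l.length - (i+1))).foldl (fun (s : List Int × Int) (j : Nat) =>
            if PySem.Int.mod (l.getD j 0) (l.getD i 0) == 0 then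
              (s.1.set j (s.1.getD j 0 + 1), s.2 + (s.1.set j (s.1.getD j 0 + 1)).getD i 0)
            else s) s)
        (List.replicate l.length 0, 0)) =
        (C, ((List.range m).map (fun i => pvCnt l i * pvRgt l i)).sum) ∧
      C.length = l.length ∧
      ∀ j : Nat, j < l.length → C.getD j 0 =
        (((List.range m).filter (fun i => decide (i < j) && pvP l j i)).length : Int) := by
  intro m
  induction m with
  | zero =>
    intro _
    exact ⟨List.replicate l.length 0, by simp, by simp, fun j _ => by simp [List.getD_eq_getElem?_getD]⟩
  | succ m ih =>
    intro hm
    obtain ⟨C, hfold, hlen, hpt⟩ := ih (by omega)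
    rw [List.range_succ, List.foldl_append, hfold]
    simp only [List.foldl_cons, List.foldl_nil]
    rw [innerA l m (l.length - (m+1)) (m+1) C _ (by omega) (by omega) hlen]
    obtain ⟨hpt2, hlen2⟩ := innerA_arr l m (l.length - (m+1)) (m+1) C (by omega) hlen
    refine ⟨(List.range' (m+1) (l.length - (m+1))).foldl
        (fun c j => if pvP l j m then c.set j (c.getD j 0 + 1) else c) C, ?_, ?_, ?_⟩
    · congr 1
      rw [List.map_append, List.sum_append]
      simp only [List.map_cons, List.map_nil, List.sum_cons, List.sum_nil, add_zero]
      congr 1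
      have hCm : C.getD m 0 = pvCnt l m := by
        rw [hpt m (by omega), pvCnt]
        congr 2
        apply List.filter_congr
        intro i hi
        have := List.mem_range.mp hi
        simp [this]
      rw [hCm, pvRgt]
    · exact hlen2.trans hlen
    · intro j hj
      rw [hpt2 j, hpt j hj, List.filter_append, List.length_append]
      simp only [List.filter_cons, List.filter_nil]
      have hjmem : j ∈ List.range' (m+1) (l.length - (m+1)) ↔ (m + 1 ≤ j ∧ j < l.length) := by
        rw [List.mem_range'_1]; omega
      by_cases hlt : m < j
      · by_cases hp : pvP l j m
        · have hin : j ∈ List.range' (m+1) (l.length - (m+1)) := hjmem.mpr ⟨by omega, hj⟩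
          simp [hin, hp, hlt]
        · by_cases hjm : j ∈ List.range' (m+1) (l.length - (m+1)) <;> simp [hjm, hp, hlt]
      · have hnm : j ∉ List.range' (m+1) (l.length - (m+1)) := by
          intro h
          have := List.mem_range'_1.mp h
          omega
        simp [hnm, hlt]

-- ===== VERDICT (by name: the statement is the Claim_ definition above) =====
theorem solution_spec : Claim_equal_solution := by
  intro l _ _
  unfold Spec_solution solution
  obtain ⟨C, hfold, _, _⟩ := outerA l l.length (le_refl _)
  simp only []
  rw [hfold, alt_eq_sum]
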